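-- pv_equiv track=rewrite | github.com/pypi-data/pypi-mirror-399 | packages/netcl/netcl-0.1.3-py3-none-any.whl/netcl/ops/elementwise.py | _split_ternary
-- ===== SOURCE A (Python) =====
-- def _strip_outer_parens(expr: str) -> str:
--     while expr.startswith("(") and expr.endswith(")"):
--         depth = 0
--         valid = True
--         for i, ch in enumerate(expr):
--             if ch == "(":
--                 depth += 1
--             elif ch == ")":
--                 depth -= 1
--                 if depth == 0 and i != len(expr) - 1:
--                     valid = False
--                     break
--         if depth != 0 or not valid:
--             break
--         expr = expr[1:-1]
--     return expr
--
-- def _split_ternary(expr: str):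
--     expr = _strip_outer_parens(expr)
--     depth = 0
--     q_index = -1
--     for i, ch in enumerate(expr):
--         if ch == "(":
--             depth += 1
--         elif ch == ")":
--             depth -= 1
--         elif ch == "?" and depth == 0:
--             q_index = i
--             break
--     if q_index < 0:
--         return None
--     depth = 0
--     nested = 0
--     for i in range(q_index + 1, len(expr)):
--         ch = expr[i]
--         if ch == "(":
--             depth += 1
--         elif ch == ")":
--             depth -= 1
--         elif ch == "?" and depth == 0:
--             nested += 1
--         elif ch == ":" and depth == 0:
--             if nested == 0:
--                 return expr[:q_index], expr[q_index + 1 : i], expr[i + 1 :]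
--             nested -= 1
--     return None
-- ===== SOURCE B (Python) =====
-- def _split_ternary(expr):
--     s = expr
--     n = len(s)
--     # count enclosing paren layers with one depth scan, then slice once
--     L = 0
--     while L < n and s[L] == '(':
--         L += 1
--     R = 0
--     while R < n and s[n - 1 - R] == ')':
--         R += 1
--     d = 0
--     m = None  # min depth over the middle window [L, n-1-R]
--     for i in range(n):
--         ch = s[i]
--         if ch == '(':
--             d += 1
--         elif ch == ')':
--             d -= 1
--         if L <= i <= n - 1 - R:
--             if m is None or d < m:
--                 m = d
--     if d != 0:
--         k = 0
--     else:
--         k = min(L, R)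
--         if m is not None and m < k:
--             k = m
--         if k < 0:
--             k = 0
--     s = s[k:n - k]
--     # one fused pass: find the top-level '?' and its matching ':'
--     q = -1
--     nested = 0
--     d = 0
--     for i, ch in enumerate(s):
--         if ch == '(':
--             d += 1
--         elif ch == ')':
--             d -= 1
--         elif ch == '?' and d == 0:
--             if q < 0:
--                 q = i
--             else:
--                 nested += 1
--         elif ch == ':' and d == 0 and q >= 0:
--             if nested == 0:
--                 return s[:q], s[q + 1:i], s[i + 1:]
--             nested -= 1
--     return None
-- ===== Notes on version B (the rewrite author's own statement) =====
-- stated objective: alternative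
-- what changed: A strips enclosing parens by re-scanning the whole string once per stripped layer and then runs two separate scans to locate the ternary operators; B counts all fully-enclosing paren layers with a single depth scan (leading/trailing run + min depth in the middle window) followed by one slice, and locates the top-level question mark and its matching colon in one fused pass.
import Mathlib
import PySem

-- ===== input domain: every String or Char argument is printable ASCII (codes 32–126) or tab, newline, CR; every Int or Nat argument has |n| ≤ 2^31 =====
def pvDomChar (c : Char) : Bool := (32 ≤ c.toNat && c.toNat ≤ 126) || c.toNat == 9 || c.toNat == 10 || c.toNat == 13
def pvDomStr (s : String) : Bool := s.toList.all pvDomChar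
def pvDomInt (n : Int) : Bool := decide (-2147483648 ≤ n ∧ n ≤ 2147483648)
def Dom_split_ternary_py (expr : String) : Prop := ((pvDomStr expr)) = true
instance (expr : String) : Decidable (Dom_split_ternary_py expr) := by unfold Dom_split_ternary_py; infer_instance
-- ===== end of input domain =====

-- B replaces A's repeated full re-scan per stripped paren layer by one depth scan + a single slice, and fuses A's two '?'/':' scans into one pass (objective: alternative algorithm); no argument is mutated.

-- ===== PORT A =====
-- inner 'for i, ch in enumerate(expr)' scan of _strip_outer_parens: returns (depth, valid)
def aScan (n : Nat) : List Char → Nat → Int → Int × Bool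
  | [], _, d => (d, true)
  | c :: rest, i, d =>
    if c = '(' then aScan n rest (i + 1) (d + 1)
    else if c = ')' then
      if d - 1 = 0 ∧ i ≠ n - 1 then (d - 1, false)
      else aScan n rest (i + 1) (d - 1)
    else aScan n rest (i + 1) d

-- the 'while expr.startswith("(") and expr.endswith(")")' loop; expr[1:-1] = (drop 1).dropLast
def aStrip (l : List Char) : List Char :=
  if h : l.head? = some '(' ∧ l.getLast? = some ')' then
    let r := aScan l.length l 0 0
    if r.1 = 0 ∧ r.2 = true then aStrip ((l.drop 1).dropLast)
    else l
  else l
termination_by l.length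
decreasing_by
  have : l ≠ [] := by intro hn; rw [hn] at h; simp at h
  have : 0 < l.length := List.length_pos_iff.mpr this
  simp [List.length_dropLast, List.length_drop]; omega

-- first loop of _split_ternary: first '?' at depth 0
def aFindQ : List Char → Nat → Int → Option Nat
  | [], _, _ => none
  | c :: rest, i, d =>
    if c = '(' then aFindQ rest (i + 1) (d + 1)
    else if c = ')' then aFindQ rest (i + 1) (d - 1)
    else if c = '?' ∧ d = 0 then some i
    else aFindQ rest (i + 1) d

-- second loop 'for i in range(q_index+1, len(expr))', iterated as the suffix s.drop (q+1) with its index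
def aFindC (s : List Char) (q : Nat) : List Char → Nat → Int → Int → Option (List String)
  | [], _, _, _ => none
  | c :: rest, i, d, nested =>
    if c = '(' then aFindC s q rest (i + 1) (d + 1) nested
    else if c = ')' then aFindC s q rest (i + 1) (d - 1) nested
    else if c = '?' ∧ d = 0 then aFindC s q rest (i + 1) d (nested + 1)
    else if c = ':' ∧ d = 0 then
      if nested = 0 then
        some [String.ofList (s.take q), String.ofList ((s.drop (q + 1)).take (i - (q + 1))), String.ofList (s.drop (i + 1))]
      else aFindC s q rest (i + 1) d (nested - 1)
    else aFindC s q rest (i + 1) d nested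

def split_ternary_py (expr : String) : Option (List String) :=
  let s := aStrip expr.toList
  match aFindQ s 0 0 with
  | none => none
  | some q => aFindC s q (s.drop (q + 1)) (q + 1) 0 0

-- ===== PORT B =====
-- while L < n and s[L] == '(' : leading '(' run
def bLead : List Char → Nat
  | '(' :: rest => bLead rest + 1
  | _ => 0

-- while R < n and s[n-1-R] == ')' : trailing ')' run, scanned from the end (applied to s.reverse)
def bTrail : List Char → Nat
  | ')' :: rest => bTrail rest + 1
  | _ => 0

-- the single 'for i in range(n)' pass: net depth d and min depth m over window [lo, hi]
def bMinGo (lo hi : Int) : List Char → Nat → Int → Option Int → Int × Option Int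
  | [], _, d, m => (d, m)
  | c :: rest, i, d, m =>
    let d' := if c = '(' then d + 1 else if c = ')' then d - 1 else d
    let m' := if lo ≤ (i : Int) ∧ (i : Int) ≤ hi then
        match m with
        | none => some d'
        | some mv => if d' < mv then some d' else some mv
      else m
    bMinGo lo hi rest (i + 1) d' m'

-- number of fully-enclosing paren layers, from one scan
def bStripCount (s : List Char) : Int :=
  let n := s.length
  let L := bLead s
  let R := bTrail s.reverse
  let dm := bMinGo (L : Int) ((n : Int) - 1 - (R : Int)) s 0 0 none
  if dm.1 ≠ 0 then 0
  else
    let k : Int := min (L : Int) (R : Int)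
    let k := match dm.2 with
      | none => k
      | some mv => if mv < k then mv else k
    if k < 0 then 0 else k

-- fused single pass: find top-level '?' (q) and its matching ':'
def bGo (s : List Char) : List Char → Nat → Int → Option Nat → Int → Option (List String)
  | [], _, _, _, _ => none
  | c :: rest, i, d, q, nested =>
    if c = '(' then bGo s rest (i + 1) (d + 1) q nested
    else if c = ')' then bGo s rest (i + 1) (d - 1) q nested
    else if c = '?' ∧ d = 0 then
      match q with
      | none => bGo s rest (i + 1) d (some i) nested
      | some _ => bGo s rest (i + 1) d q (nested + 1)
    else if c = ':' ∧ d = 0 then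
      match q with
      | none => bGo s rest (i + 1) d none nested
      | some qi =>
        if nested = 0 then
          some [String.ofList (s.take qi), String.ofList ((s.drop (qi + 1)).take (i - (qi + 1))), String.ofList (s.drop (i + 1))]
        else bGo s rest (i + 1) d q (nested - 1)
    else bGo s rest (i + 1) d q nested

def split_ternary_py_alt (expr : String) : Option (List String) :=
  let s0 := expr.toList
  let k := bStripCount s0
  let s := PySem.List.slice s0 (some k) (some ((s0.length : Int) - k))
  bGo s s 0 0 none 0

-- ===== PRECONDITION & SPEC =====
def Spec_split_ternary_py (expr : String) (out : Option (List String)) : Prop := out = split_ternary_py_alt expr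
instance (expr : String) (out : Option (List String)) : Decidable (Spec_split_ternary_py expr out) := by unfold Spec_split_ternary_py; infer_instance

-- ===== CLAIM (what is proved, stated in full; the proofs are below) =====
def Claim_equal_split_ternary_py : Prop := ∀ (expr : String), Dom_split_ternary_py expr → Spec_split_ternary_py expr (split_ternary_py expr)

-- ===== LEMMAS AND PROOFS =====

-- character weight and prefix depths
def wgt (c : Char) : Int := if c = '(' then 1 else if c = ')' then -1 else 0
def dep (l : List Char) : Int := (l.map wgt).sum
def pd (l : List Char) (j : Nat) : Int := dep (l.take (j + 1))

theorem dep_nil : dep [] = 0 := rfl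
theorem dep_cons (c : Char) (l : List Char) : dep (c :: l) = wgt c + dep l := by simp [dep]
theorem dep_append (xs ys : List Char) : dep (xs ++ ys) = dep xs + dep ys := by simp [dep]
theorem pd_zero (c : Char) (l : List Char) : pd (c :: l) 0 = wgt c := by simp [pd, dep]
theorem pd_cons (c : Char) (l : List Char) (j : Nat) : pd (c :: l) (j + 1) = wgt c + pd l j := by
  simp [pd, dep]
theorem wgt_lb (c : Char) : -1 ≤ wgt c := by unfold wgt; split_ifs <;> omega
theorem wgt_neg_one (c : Char) (h : wgt c = -1) : c = ')' := by
  unfold wgt at h; split_ifs at h with h1 h2 <;> first | omega | exact h2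
theorem pd_succ (l : List Char) (j : Nat) (h : j + 1 < l.length) :
    pd l (j + 1) = pd l j + wgt (l.getD (j + 1) ' ') := by
  unfold pd
  rw [List.take_add_one, dep_append]
  have : l[j + 1]? = some l[j + 1] := List.getElem?_eq_getElem h
  rw [List.getD_eq_getElem l ' ' h, this]
  simp [dep]

-- reference strip count: one layer valid iff balanced and depth positive strictly inside
def GoodL (l : List Char) : Prop :=
  l.head? = some '(' ∧ l.getLast? = some ')' ∧ dep l = 0 ∧ ∀ j < l.length - 1, 0 < pd l j

def decGoodL (l : List Char) : Decidable (GoodL l) := by unfold GoodL; infer_instance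

def gN (l : List Char) : Nat :=
  @dite _ (GoodL l) (decGoodL l) (fun _ => gN ((l.drop 1).dropLast) + 1) (fun _ => 0)
termination_by l.length
decreasing_by
  rename_i h
  have hne : l ≠ [] := by intro hn; rw [hn] at h; simp [GoodL] at h
  have : 0 < l.length := List.length_pos_iff.mpr hne
  simp [List.length_dropLast, List.length_drop]; omega

theorem aScan_no_exit (l : List Char) (n : Nat) : ∀ (i0 : Nat) (d0 : Int),
    (∀ j < l.length, i0 + j ≠ n - 1 → ¬(l.getD j ' ' = ')' ∧ d0 + pd l j = 0)) →
    aScan n l i0 d0 = (d0 + dep l, true) := by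
  induction l with
  | nil => intro i0 d0 _; simp [aScan, dep_nil]
  | cons c rest ih =>
    intro i0 d0 h
    have hs : ∀ j < rest.length, (i0 + 1) + j ≠ n - 1 →
        ¬(rest.getD j ' ' = ')' ∧ (d0 + wgt c) + pd rest j = 0) := by
      intro j hj hne hcon
      refine h (j + 1) (by simp; omega) (by omega) ⟨by simpa using hcon.1, ?_⟩
      rw [pd_cons]; linarith [hcon.2]
    simp only [aScan]
    split_ifs with h1 h2 h3
    · have hw : wgt c = 1 := by simp [wgt, h1]
      rw [ih (i0 + 1) (d0 + 1) (by rw [hw] at hs; simpa using hs), dep_cons, hw]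
      simp only [Prod.mk.injEq]; exact ⟨by ring, trivial⟩
    · exfalso
      refine h 0 (by simp) (by omega) ⟨by simpa using h2, ?_⟩
      rw [pd_zero]
      have hw : wgt c = -1 := by simp [wgt, h1, h2]
      rw [hw]; omega
    · have hw : wgt c = -1 := by simp [wgt, h1, h2]
      rw [ih (i0 + 1) (d0 - 1) (by rw [hw] at hs; simpa using hs), dep_cons, hw]
      simp only [Prod.mk.injEq]; exact ⟨by ring, trivial⟩
    · have hw : wgt c = 0 := by simp [wgt, h1, h2]
      rw [ih (i0 + 1) d0 (by rw [hw] at hs; simpa using hs), dep_cons, hw]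
      simp only [Prod.mk.injEq]; exact ⟨by ring, trivial⟩

theorem aScan_exit (l : List Char) (n : Nat) : ∀ (i0 : Nat) (d0 : Int),
    (∃ j < l.length, l.getD j ' ' = ')' ∧ d0 + pd l j = 0 ∧ i0 + j ≠ n - 1) →
    aScan n l i0 d0 = (0, false) := by
  induction l with
  | nil => intro i0 d0 h; simp at h
  | cons c rest ih =>
    intro i0 d0 h
    obtain ⟨j, hj, hrp, hz, hne⟩ := h
    simp only [aScan]
    split_ifs with h1 h2 h3
    · -- c = '(' : the witness j cannot be 0
      refine ih (i0 + 1) (d0 + 1) ?_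
      match j with
      | 0 => exact absurd (by simpa using hrp) (by simp [h1])
      | j + 1 =>
        refine ⟨j, by simpa using hj, by simpa using hrp, ?_, by omega⟩
        rw [pd_cons] at hz
        have hw : wgt c = 1 := by simp [wgt, h1]
        rw [hw] at hz; linarith
    · rw [h3.1]
    · -- c = ')' but no early exit at index i0
      refine ih (i0 + 1) (d0 - 1) ?_
      match j with
      | 0 =>
        exfalso
        rw [pd_zero] at hz
        have hw : wgt c = -1 := by simp [wgt, h1, h2]
        rw [hw] at hz
        exact h3 ⟨by omega, by omega⟩
      | j + 1 =>
        refine ⟨j, by simpa using hj, by simpa using hrp, ?_, by omega⟩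
        rw [pd_cons] at hz
        have hw : wgt c = -1 := by simp [wgt, h1, h2]
        rw [hw] at hz; linarith
    · refine ih (i0 + 1) d0 ?_
      match j with
      | 0 => exact absurd (by simpa using hrp) h2
      | j + 1 =>
        refine ⟨j, by simpa using hj, by simpa using hrp, ?_, by omega⟩
        rw [pd_cons] at hz
        have hw : wgt c = 0 := by simp [wgt, h1, h2]
        rw [hw] at hz; linarith

-- crossing: head '(' and some inner prefix depth ≤ 0 forces an inner ')' with depth exactly 0
theorem crossing (l : List Char) (hh : l.head? = some '(')
    (h : ∃ j < l.length - 1, pd l j ≤ 0) :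
    ∃ j < l.length - 1, l.getD j ' ' = ')' ∧ pd l j = 0 := by
  have hex : ∃ j, pd l j ≤ 0 ∧ j < l.length - 1 := by
    obtain ⟨j, hj, hp⟩ := h; exact ⟨j, hp, hj⟩
  have hj0 := Nat.find_spec hex
  have h0 : pd l 0 = 1 := by
    cases l with
    | nil => simp at hh
    | cons c t =>
      simp at hh
      rw [pd_zero, hh]
      simp [wgt]
  have hj0pos : Nat.find hex ≠ 0 := by
    intro e
    rw [e, h0] at hj0
    omega
  obtain ⟨j1, he⟩ : ∃ j1, Nat.find hex = j1 + 1 := ⟨Nat.find hex - 1, by omega⟩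
  have hprev : ¬(pd l j1 ≤ 0 ∧ j1 < l.length - 1) := Nat.find_min hex (by omega)
  have hpprev : 0 < pd l j1 := by
    by_contra hc
    push_neg at hc
    exact hprev ⟨hc, by omega⟩
  have hs : pd l (j1 + 1) = pd l j1 + wgt (l.getD (j1 + 1) ' ') :=
    pd_succ l j1 (by omega)
  have hwlb := wgt_lb (l.getD (j1 + 1) ' ')
  rw [he] at hj0
  have hw : wgt (l.getD (j1 + 1) ' ') = -1 := by omega
  exact ⟨j1 + 1, by omega, wgt_neg_one _ hw, by omega⟩

-- A's one-layer test agrees with GoodL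
theorem aScan_good (l : List Char) (hh : l.head? = some '(') (hl : l.getLast? = some ')') :
    ((aScan l.length l 0 0).1 = 0 ∧ (aScan l.length l 0 0).2 = true) ↔ GoodL l := by
  have hne : l ≠ [] := by intro e; rw [e] at hh; simp at hh
  have hlen : 0 < l.length := List.length_pos_iff.mpr hne
  constructor
  · intro ⟨h1, h2⟩
    have hnb : ¬ ∃ j < l.length, l.getD j ' ' = ')' ∧ (0 : Int) + pd l j = 0 ∧ 0 + j ≠ l.length - 1 := by
      intro hb
      rw [aScan_exit l l.length 0 0 hb] at h2
      simp at h2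
    have hforall : ∀ j < l.length, 0 + j ≠ l.length - 1 → ¬(l.getD j ' ' = ')' ∧ (0 : Int) + pd l j = 0) := by
      intro j hj hne' hcon
      exact hnb ⟨j, hj, hcon.1, hcon.2, hne'⟩
    have hok := aScan_no_exit l l.length 0 0 hforall
    rw [hok] at h1
    simp at h1
    refine ⟨hh, hl, h1, ?_⟩
    intro j hj
    by_contra hc
    push_neg at hc
    obtain ⟨j', hj', hcp, hz⟩ := crossing l hh ⟨j, hj, hc⟩
    exact hnb ⟨j', by omega, hcp, by rw [hz]; ring, by omega⟩
  · intro ⟨_, _, hdep, hpos⟩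
    have hok := aScan_no_exit l l.length 0 0 (by
      intro j hj hne' hcon
      have : 0 < pd l j := hpos j (by omega)
      omega)
    rw [hok, hdep]
    simp

theorem inner_slice (l : List Char) (g : Nat) :
    ((l.drop 1).dropLast.drop g).take ((l.drop 1).dropLast.length - 2 * g) =
      (l.drop (g + 1)).take (l.length - 2 * (g + 1)) := by
  rw [List.dropLast_eq_take, List.drop_take, List.take_take]
  rw [List.drop_drop]
  congr 1
  · simp [List.length_take, List.length_drop]
    omega
  · congr 1
    omega

-- A's strip equals a single slice by the reference count
theorem aStrip_eq (l : List Char) :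
    aStrip l = (l.drop (gN l)).take (l.length - 2 * gN l) := by
  induction l using aStrip.induct with
  | case1 l h r hr ih =>
    have hg : GoodL l := (aScan_good l h.1 h.2).mp hr
    have hgn : gN l = gN ((l.drop 1).dropLast) + 1 := by rw [gN, dif_pos hg]
    rw [aStrip, dif_pos h, if_pos hr, ih, hgn]
    exact inner_slice l _
  | case2 l h r hr =>
    have hg : ¬ GoodL l := fun g => hr ((aScan_good l h.1 h.2).mpr g)
    have hgn : gN l = 0 := by rw [gN, dif_neg hg]
    rw [aStrip, dif_pos h, if_neg hr, hgn]
    simp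
  | case3 l h =>
    have hgn : gN l = 0 := by rw [gN, dif_neg (fun g => h ⟨g.1, g.2.1⟩)]
    rw [aStrip, dif_neg h, hgn]
    simp

-- B-side characterizations
theorem dstep (c : Char) (d : Int) :
    (if c = '(' then d + 1 else if c = ')' then d - 1 else d) = d + wgt c := by
  unfold wgt; split_ifs <;> omega

theorem dep_replicate (k : Nat) (c : Char) : dep (List.replicate k c) = k * wgt c := by
  induction k with
  | zero => simp [dep]
  | succ k ih =>
    rw [List.replicate_succ, dep_cons, ih]
    push_cast; ring

theorem bLead_cons (t : List Char) : bLead ('(' :: t) = bLead t + 1 := rfl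

theorem bLead_cons_ne (c : Char) (t : List Char) (h : c ≠ '(') : bLead (c :: t) = 0 := by
  unfold bLead
  split
  · rename_i he; cases he; exact absurd rfl h
  · rfl

theorem bLead_take (l : List Char) : l.take (bLead l) = List.replicate (bLead l) '(' := by
  induction l with
  | nil => simp [bLead]
  | cons c t ih =>
    by_cases hc : c = '('
    · subst hc; rw [bLead_cons, List.take_succ_cons, ih, List.replicate_succ]
    · rw [bLead_cons_ne c t hc]; simp

theorem bLead_pos_iff (l : List Char) : l.head? = some '(' ↔ 1 ≤ bLead l := by
  cases l with
  | nil => simp [bLead]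
  | cons c t =>
    by_cases hc : c = '('
    · subst hc; simp [bLead_cons]
    · rw [bLead_cons_ne c t hc]; simp; intro h; exact hc h

theorem bLead_append_ne (z : List Char) (c : Char) (h : c ≠ '(') :
    bLead (z ++ [c]) = bLead z := by
  induction z with
  | nil => simpa using bLead_cons_ne c [] h
  | cons x t ih =>
    by_cases hx : x = '('
    · subst hx
      rw [List.cons_append, bLead_cons, bLead_cons, ih]
    · rw [List.cons_append, bLead_cons_ne x _ hx, bLead_cons_ne x t hx]

theorem bTrail_cons (t : List Char) : bTrail (')' :: t) = bTrail t + 1 := rfl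

theorem bTrail_cons_ne (c : Char) (t : List Char) (h : c ≠ ')') : bTrail (c :: t) = 0 := by
  unfold bTrail
  split
  · rename_i he; cases he; exact absurd rfl h
  · rfl

theorem bTrail_le (l : List Char) : bTrail l ≤ l.length := by
  induction l with
  | nil => simp [bTrail]
  | cons c t ih =>
    by_cases hc : c = ')'
    · subst hc; rw [bTrail_cons]; simpa using ih
    · rw [bTrail_cons_ne c t hc]; simp

theorem bTrail_take (l : List Char) : l.take (bTrail l) = List.replicate (bTrail l) ')' := by
  induction l with
  | nil => simp [bTrail]
  | cons c t ih =>
    by_cases hc : c = ')'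
    · subst hc; rw [bTrail_cons, List.take_succ_cons, ih, List.replicate_succ]
    · rw [bTrail_cons_ne c t hc]; simp

theorem bTrail_pos_iff (l : List Char) : l.head? = some ')' ↔ 1 ≤ bTrail l := by
  cases l with
  | nil => simp [bTrail]
  | cons c t =>
    by_cases hc : c = ')'
    · subst hc; simp [bTrail_cons]
    · rw [bTrail_cons_ne c t hc]; simp; intro h; exact hc h

theorem bTrail_append_ne (z : List Char) (c : Char) (h : c ≠ ')') :
    bTrail (z ++ [c]) = bTrail z := by
  induction z with
  | nil => simpa using bTrail_cons_ne c [] h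
  | cons x t ih =>
    by_cases hx : x = ')'
    · subst hx
      rw [List.cons_append, bTrail_cons, bTrail_cons, ih]
    · rw [List.cons_append, bTrail_cons_ne x _ hx, bTrail_cons_ne x t hx]

-- prefix depths inside the leading '(' run
theorem pd_lead (l : List Char) (j : Nat) (h : j < bLead l) : pd l j = (j : Int) + 1 := by
  have h1 : l.take (j + 1) = List.replicate (j + 1) '(' := by
    have : l.take (j + 1) = (l.take (bLead l)).take (j + 1) := by
      rw [List.take_take]; congr 1; omega
    rw [this, bLead_take, List.take_replicate]
    congr 1; omega
  unfold pd
  rw [h1, dep_replicate]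
  simp [wgt]

-- the trailing run as a replicate suffix
theorem suffix_run (l : List Char) :
    l.drop (l.length - bTrail l.reverse) = List.replicate (bTrail l.reverse) ')' := by
  have h1 := bTrail_take l.reverse
  have h2 : l.drop (l.length - bTrail l.reverse) = (l.reverse.take (bTrail l.reverse)).reverse := by
    rw [List.reverse_take]
    simp
  rw [h2, h1, List.reverse_replicate]

-- prefix depths inside the trailing ')' run (for balanced l)
theorem pd_trail (l : List Char) (j : Nat) (hdep : dep l = 0)
    (h : l.length - 1 - bTrail l.reverse ≤ j) (hj : j < l.length) :
    pd l j = (l.length : Int) - 1 - j := by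
  have hR := bTrail_le l.reverse
  rw [List.length_reverse] at hR
  have hsplit : dep (l.take (j + 1)) + dep (l.drop (j + 1)) = 0 := by
    rw [← dep_append, List.take_append_drop, hdep]
  have hdrop : l.drop (j + 1) = List.replicate (l.length - 1 - j) ')' := by
    have e1 : l.drop (j + 1) = (l.drop (l.length - bTrail l.reverse)).drop (j + 1 - (l.length - bTrail l.reverse)) := by
      rw [List.drop_drop]; congr 1; omega
    rw [e1, suffix_run, List.drop_replicate]
    congr 1; omega
  unfold pd
  rw [hdrop, dep_replicate] at hsplit
  unfold pd at *
  have : ((l.length - 1 - j : Nat) : Int) = (l.length : Int) - 1 - j := by omega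
  rw [this] at hsplit
  simp [wgt] at hsplit
  omega

theorem bMinGo_cons (lo hi : Int) (c : Char) (rest : List Char) (i0 : Nat) (d0 : Int) (m0 : Option Int) :
    bMinGo lo hi (c :: rest) i0 d0 m0 =
      bMinGo lo hi rest (i0 + 1) (d0 + wgt c)
        (if lo ≤ (i0 : Int) ∧ (i0 : Int) ≤ hi then
           match m0 with
           | none => some (d0 + wgt c)
           | some mv => if d0 + wgt c < mv then some (d0 + wgt c) else some mv
         else m0) := by
  conv_lhs => rw [bMinGo.eq_def]
  simp only [dstep]

theorem bMinGo_fst (lo hi : Int) (l : List Char) : ∀ (i0 : Nat) (d0 : Int) (m0 : Option Int),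
    (bMinGo lo hi l i0 d0 m0).1 = d0 + dep l := by
  induction l with
  | nil => intro i0 d0 m0; simp [bMinGo, dep_nil]
  | cons c rest ih =>
    intro i0 d0 m0
    rw [bMinGo_cons, ih, dep_cons]
    ring

theorem bMinGo_none (lo hi : Int) (l : List Char) : ∀ (i0 : Nat) (d0 : Int) (m0 : Option Int),
    ((bMinGo lo hi l i0 d0 m0).2 = none ↔
      m0 = none ∧ ∀ j < l.length, ¬(lo ≤ (i0 + j : Int) ∧ (i0 + j : Int) ≤ hi)) := by
  induction l with
  | nil => intro i0 d0 m0; simp [bMinGo]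
  | cons c rest ih =>
    intro i0 d0 m0
    rw [bMinGo_cons, ih]
    by_cases hw : lo ≤ (i0 : Int) ∧ (i0 : Int) ≤ hi
    · rw [if_pos hw]
      constructor
      · intro ⟨h1, _⟩
        exfalso
        cases m0 <;> simp at h1
        rename_i mv
        split_ifs at h1 <;> simp at h1
      · intro ⟨_, h2⟩
        exact absurd hw (by simpa using h2 0 (by simp))
    · rw [if_neg hw]
      constructor
      · intro ⟨h1, h2⟩
        refine ⟨h1, ?_⟩
        intro j hj
        match j with
        | 0 => simpa using hw
        | j + 1 =>
          have := h2 j (by simpa using hj)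
          intro hc
          exact this (by push_cast at hc ⊢; constructor <;> omega)
      · intro ⟨h1, h2⟩
        refine ⟨h1, ?_⟩
        intro j hj
        have := h2 (j + 1) (by simpa using hj)
        intro hc
        exact this (by push_cast at hc ⊢; constructor <;> omega)

theorem bMinGo_le (lo hi : Int) (l : List Char) : ∀ (i0 : Nat) (d0 : Int) (m0 : Option Int) (v : Int),
    (bMinGo lo hi l i0 d0 m0).2 = some v →
      (∀ u, m0 = some u → v ≤ u) ∧
      (∀ j < l.length, lo ≤ (i0 + j : Int) → (i0 + j : Int) ≤ hi → v ≤ d0 + pd l j) := by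
  induction l with
  | nil =>
    intro i0 d0 m0 v h
    simp [bMinGo] at h
    subst h
    exact ⟨fun u hu => by simp at hu; omega, fun j hj => by simp at hj⟩
  | cons c rest ih =>
    intro i0 d0 m0 v h
    rw [bMinGo_cons] at h
    obtain ⟨ha, hb⟩ := ih (i0 + 1) (d0 + wgt c) _ v h
    by_cases hw : lo ≤ (i0 : Int) ∧ (i0 : Int) ≤ hi
    · rw [if_pos hw] at ha
      have hvd : v ≤ d0 + wgt c := by
        cases hm : m0 with
        | none => exact ha _ (by rw [hm])
        | some u =>
          rw [hm] at ha
          by_cases hlt : d0 + wgt c < u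
          · exact ha _ (by show (if d0 + wgt c < u then some (d0 + wgt c) else some u) = _; rw [if_pos hlt])
          · have := ha u (by show (if d0 + wgt c < u then some (d0 + wgt c) else some u) = _; rw [if_neg hlt])
            omega
      constructor
      · intro u hu
        rw [hu] at ha
        by_cases hlt : d0 + wgt c < u
        · have := ha _ (by show (if d0 + wgt c < u then some (d0 + wgt c) else some u) = _; rw [if_pos hlt])
          omega
        · exact ha u (by show (if d0 + wgt c < u then some (d0 + wgt c) else some u) = _; rw [if_neg hlt])
      · intro j hj h1 h2
        match j with
        | 0 => rw [pd_zero]; simpa using hvd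
        | j + 1 =>
          rw [pd_cons]
          have := hb j (by simpa using hj) (by push_cast at h1 ⊢; omega) (by push_cast at h2 ⊢; omega)
          omega
    · rw [if_neg hw] at ha
      refine ⟨ha, ?_⟩
      intro j hj h1 h2
      match j with
      | 0 => exact absurd ⟨by simpa using h1, by simpa using h2⟩ hw
      | j + 1 =>
        rw [pd_cons]
        have := hb j (by simpa using hj) (by push_cast at h1 ⊢; omega) (by push_cast at h2 ⊢; omega)
        omega

theorem bMinGo_mem (lo hi : Int) (l : List Char) : ∀ (i0 : Nat) (d0 : Int) (m0 : Option Int) (v : Int),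
    (bMinGo lo hi l i0 d0 m0).2 = some v →
      m0 = some v ∨ ∃ j < l.length, lo ≤ (i0 + j : Int) ∧ (i0 + j : Int) ≤ hi ∧ v = d0 + pd l j := by
  induction l with
  | nil =>
    intro i0 d0 m0 v h
    simp [bMinGo] at h
    left; rw [h]
  | cons c rest ih =>
    intro i0 d0 m0 v h
    rw [bMinGo_cons] at h
    have hshift : ∀ j < rest.length, lo ≤ (i0 + 1 + j : Int) → (i0 + 1 + j : Int) ≤ hi →
        v = d0 + wgt c + pd rest j →
        ∃ j' < (c :: rest).length, lo ≤ (i0 + j' : Int) ∧ (i0 + j' : Int) ≤ hi ∧ v = d0 + pd (c :: rest) j' := by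
      intro j hj h1 h2 hv
      exact ⟨j + 1, by simpa using hj, by push_cast at h1 ⊢; omega, by push_cast at h2 ⊢; omega,
        by rw [pd_cons]; omega⟩
    rcases ih (i0 + 1) (d0 + wgt c) _ v h with hm | ⟨j, hj, h1, h2, hv⟩
    · by_cases hw : lo ≤ (i0 : Int) ∧ (i0 : Int) ≤ hi
      · rw [if_pos hw] at hm
        cases hm0 : m0 with
        | none =>
          rw [hm0] at hm
          simp at hm
          right
          exact ⟨0, by simp, by simpa using hw.1, by simpa using hw.2, by rw [pd_zero]; omega⟩
        | some u =>
          rw [hm0] at hm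
          have hm' : (if d0 + wgt c < u then some (d0 + wgt c) else some u) = some v := hm
          by_cases hlt : d0 + wgt c < u
          · rw [if_pos hlt] at hm'
            simp at hm'
            right
            exact ⟨0, by simp, by simpa using hw.1, by simpa using hw.2, by rw [pd_zero]; omega⟩
          · rw [if_neg hlt] at hm'
            simp at hm'
            left; rw [hm']
      · rw [if_neg hw] at hm
        left; exact hm
    · right; exact hshift j hj h1 h2 hv

theorem bStripCount_unbal (l : List Char) (hdep : dep l ≠ 0) : bStripCount l = 0 := by
  unfold bStripCount
  dsimp only
  rw [bMinGo_fst]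
  simp [hdep]

theorem bStripCount_none (l : List Char) (hdep : dep l = 0)
    (hm : (bMinGo (bLead l) ((l.length : Int) - 1 - bTrail l.reverse) l 0 0 none).2 = none) :
    bStripCount l = min (bLead l : Int) (bTrail l.reverse : Int) := by
  unfold bStripCount
  dsimp only
  rw [bMinGo_fst]
  simp only [hdep, hm]
  have : ¬ (min (bLead l : Int) (bTrail l.reverse : Int) < 0) := by
    have := Int.natCast_nonneg (bLead l)
    have := Int.natCast_nonneg (bTrail l.reverse)
    omega
  simp [this]

theorem bStripCount_some (l : List Char) (hdep : dep l = 0) (v : Int)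
    (hm : (bMinGo (bLead l) ((l.length : Int) - 1 - bTrail l.reverse) l 0 0 none).2 = some v) :
    bStripCount l =
      (if (if v < min (bLead l : Int) (bTrail l.reverse : Int) then v
           else min (bLead l : Int) (bTrail l.reverse : Int)) < 0 then 0
       else (if v < min (bLead l : Int) (bTrail l.reverse : Int) then v
           else min (bLead l : Int) (bTrail l.reverse : Int))) := by
  unfold bStripCount
  dsimp only
  rw [bMinGo_fst]
  simp only [hdep, hm]
  norm_num

theorem getLast?_cons_ne (c : Char) (t : List Char) (h : t ≠ []) :
    (c :: t).getLast? = t.getLast? := by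
  rw [← List.head?_reverse, ← List.head?_reverse, List.reverse_cons]
  cases ht : t.reverse with
  | nil => exact absurd (by simpa using ht) h
  | cons x z => simp

theorem good_decomp (l : List Char) (hh : l.head? = some '(') (hl : l.getLast? = some ')') :
    l = '(' :: ((l.drop 1).dropLast ++ [')']) := by
  cases l with
  | nil => simp at hh
  | cons c t =>
    simp at hh
    subst hh
    cases t with
    | nil => simp at hl
    | cons x z =>
      have htne : (x :: z) ≠ [] := by simp
      have hgl : (x :: z).getLast? = some ')' := by
        rw [← getLast?_cons_ne '(' _ htne]; exact hl
      simp only [List.drop_succ_cons, List.drop_zero]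
      rw [List.dropLast_append_getLast? ')' hgl]

-- B's closed-form count equals the reference count
theorem bStripCount_eq (l : List Char) : bStripCount l = (gN l : Int) := by
  induction l using gN.induct with
  | case1 l hg ih =>
    obtain ⟨hh, hl, hdep, hpos⟩ := hg
    have hgn : gN l = gN ((l.drop 1).dropLast) + 1 := by
      rw [gN, dif_pos ⟨hh, hl, hdep, hpos⟩]
    set inner := (l.drop 1).dropLast with hinner
    have hdec : l = '(' :: (inner ++ [')']) := good_decomp l hh hl
    have hlen : l.length = inner.length + 2 := by rw [hdec]; simp
    have hbl : bLead l = bLead inner + 1 := by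
      rw [hdec, bLead_cons, bLead_append_ne inner ')' (by decide)]
    have hbt : bTrail l.reverse = bTrail inner.reverse + 1 := by
      have : l.reverse = ')' :: (inner.reverse ++ ['(']) := by rw [hdec]; simp
      rw [this, bTrail_cons, bTrail_append_ne inner.reverse '(' (by decide)]
    have hdep' : dep inner = 0 := by
      rw [hdec] at hdep
      rw [dep_cons, dep_append, dep_cons, dep_nil] at hdep
      simp [wgt] at hdep
      omega
    have hpd : ∀ j < inner.length, pd l (j + 1) = 1 + pd inner j := by
      intro j hj
      rw [hdec, pd_cons]
      unfold pd
      rw [List.take_append_of_le_length (by omega)]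
      simp [wgt]
    -- relate the two minima
    have key : bStripCount l = bStripCount inner + 1 := by
      rcases hm : (bMinGo (bLead l) ((l.length : Int) - 1 - bTrail l.reverse) l 0 0 none).2 with _ | v
      · -- window of l empty, hence window of inner empty
        have hm' : (bMinGo (bLead inner) ((inner.length : Int) - 1 - bTrail inner.reverse) inner 0 0 none).2 = none := by
          rw [bMinGo_none]
          refine ⟨rfl, ?_⟩
          intro j hj hw
          have hno := ((bMinGo_none (bLead l) ((l.length : Int) - 1 - bTrail l.reverse) l 0 0 none).mp hm).2
          refine hno (j + 1) (by omega) ?_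
          push_cast at hw ⊢
          omega
        rw [bStripCount_none l hdep hm, bStripCount_none inner hdep' hm', hbl, hbt]
        push_cast
        omega
      · -- dm.2 = some v
        rcases bMinGo_mem _ _ l 0 0 none v hm with h0 | ⟨j, hj, hw1, hw2, hv⟩
        · simp at h0
        have hR1 : bTrail l.reverse ≤ l.length := by simpa using bTrail_le l.reverse
        have hjn : j < l.length - 1 := by
          push_cast at hw2
          omega
        have hvpos : 1 ≤ v := by
          have := hpos j hjn
          push_cast at hw1
          omega
        have hjpos : 1 ≤ j := by
          push_cast at hw1
          rw [hbl] at hw1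
          push_cast at hw1
          omega
        have hja : ((j - 1 : Nat) : Int) = (j : Int) - 1 := by omega
        have hji : j - 1 < inner.length := by omega
        have hpdj : pd l j = 1 + pd inner (j - 1) := by
          have := hpd (j - 1) hji
          rwa [Nat.sub_add_cancel hjpos] at this
        have hne' : (bMinGo (bLead inner) ((inner.length : Int) - 1 - bTrail inner.reverse) inner 0 0 none).2 ≠ none := by
          intro hcon
          obtain ⟨-, hall⟩ := (bMinGo_none _ _ inner 0 0 none).mp hcon
          refine hall (j - 1) hji ⟨?_, ?_⟩
          · push_cast at hw1 ⊢
            rw [hbl] at hw1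
            push_cast at hw1
            omega
          · push_cast at hw2 ⊢
            rw [hbt] at hw2
            push_cast at hw2
            omega
        obtain ⟨v', hm'⟩ := Option.ne_none_iff_exists'.mp hne'
        have h1 : v' ≤ v - 1 := by
          have := (bMinGo_le _ _ inner 0 0 none v' hm').2 (j - 1) hji
            (by push_cast at hw1 ⊢; rw [hbl] at hw1; push_cast at hw1; omega)
            (by push_cast at hw2 ⊢; rw [hbt] at hw2; push_cast at hw2; omega)
          omega
        have h2 : v - 1 ≤ v' := by
          rcases bMinGo_mem _ _ inner 0 0 none v' hm' with h0 | ⟨j', hj', hw1', hw2', hv'⟩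
          · simp at h0
          have hlej := (bMinGo_le _ _ l 0 0 none v hm).2 (j' + 1) (by omega)
            (by push_cast at hw1' ⊢; rw [hbl]; push_cast; omega)
            (by push_cast at hw2' ⊢; rw [hbt]; push_cast; omega)
          have := hpd j' hj'
          omega
        have hveq : v' = v - 1 := by omega
        rw [bStripCount_some l hdep v hm, bStripCount_some inner hdep' v' hm', hbl, hbt, hveq]
        push_cast
        omega
    rw [key, ih, hgn]
    push_cast
    ring
  | case2 l hg =>
    have hgn : gN l = 0 := by rw [gN, dif_neg hg]
    rw [hgn]
    push_cast
    by_cases hdep : dep l = 0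
    · by_cases hh : l.head? = some '('
      · by_cases hl : l.getLast? = some ')'
        · have hex : ∃ j < l.length - 1, pd l j ≤ 0 := by
            by_contra hc
            push_neg at hc
            exact hg ⟨hh, hl, hdep, fun j hj => by have := hc j hj; omega⟩
          obtain ⟨j, hj, hple⟩ := hex
          have hR1 : bTrail l.reverse ≤ l.length := by simpa using bTrail_le l.reverse
          have hwin1 : bLead l ≤ j := by
            by_contra hc
            push_neg at hc
            have := pd_lead l j hc
            omega
          have hwin2 : (j : Int) ≤ (l.length : Int) - 1 - bTrail l.reverse := by
            by_contra hc
            push_neg at hc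
            have := pd_trail l j hdep (by omega) (by omega)
            omega
          have hne : (bMinGo (bLead l) ((l.length : Int) - 1 - bTrail l.reverse) l 0 0 none).2 ≠ none := by
            intro hcon
            obtain ⟨-, hall⟩ := (bMinGo_none _ _ l 0 0 none).mp hcon
            exact hall j (by omega) ⟨by push_cast; omega, by push_cast; omega⟩
          obtain ⟨v, hm⟩ := Option.ne_none_iff_exists'.mp hne
          have hle := (bMinGo_le _ _ l 0 0 none v hm).2 j (by omega)
            (by push_cast; omega) (by push_cast; omega)
          rw [bStripCount_some l hdep v hm]
          have h0L : (0 : Int) ≤ bLead l := Int.natCast_nonneg _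
          have h0R : (0 : Int) ≤ bTrail l.reverse := Int.natCast_nonneg _
          split_ifs <;> omega
        · have hRz : bTrail l.reverse = 0 := by
            by_contra hc
            have h1 : l.reverse.head? = some ')' := (bTrail_pos_iff l.reverse).mpr (by omega)
            rw [List.head?_reverse] at h1
            exact hl h1
          rcases hm : (bMinGo (bLead l) ((l.length : Int) - 1 - bTrail l.reverse) l 0 0 none).2 with _ | v
          · rw [bStripCount_none l hdep hm, hRz]
            have h0L : (0 : Int) ≤ bLead l := Int.natCast_nonneg _
            push_cast
            omega
          · rw [bStripCount_some l hdep v hm, hRz]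
            have h0L : (0 : Int) ≤ bLead l := Int.natCast_nonneg _
            push_cast
            split_ifs <;> omega
      · have hLz : bLead l = 0 := by
          by_contra hc
          exact hh ((bLead_pos_iff l).mpr (by omega))
        rcases hm : (bMinGo (bLead l) ((l.length : Int) - 1 - bTrail l.reverse) l 0 0 none).2 with _ | v
        · rw [bStripCount_none l hdep hm, hLz]
          have h0R : (0 : Int) ≤ bTrail l.reverse := Int.natCast_nonneg _
          push_cast
          omega
        · rw [bStripCount_some l hdep v hm, hLz]
          have h0R : (0 : Int) ≤ bTrail l.reverse := Int.natCast_nonneg _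
          push_cast
          split_ifs <;> omega
    · rw [bStripCount_unbal l hdep]

-- fused scan, phase 2 = A's second loop
theorem bGo_some (s : List Char) (q : Nat) :
    ∀ (l : List Char) (i : Nat) (d nested : Int),
      bGo s l i d (some q) nested = aFindC s q l i d nested := by
  intro l
  induction l with
  | nil => intro i d nested; rfl
  | cons c rest ih =>
    intro i d nested
    simp only [bGo, aFindC]
    split_ifs <;> first | rfl | apply ih

-- fused scan, phase 1 = A's first loop then second
theorem bGo_none (s : List Char) :
    ∀ (l : List Char) (i : Nat) (d : Int), s.drop i = l →
      bGo s l i d none 0 =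
        match aFindQ l i d with
        | none => none
        | some q => aFindC s q (s.drop (q + 1)) (q + 1) 0 0 := by
  intro l
  induction l with
  | nil => intro i d _; rfl
  | cons c rest ih =>
    intro i d hdrop
    have hrest : s.drop (i + 1) = rest := by
      rw [← List.tail_drop, hdrop]
      rfl
    simp only [bGo, aFindQ]
    split_ifs with h1 h2 h3 h4
    · exact ih (i + 1) (d + 1) hrest
    · exact ih (i + 1) (d - 1) hrest
    · obtain ⟨-, hd⟩ := h3
      subst hd
      rw [bGo_some s i rest (i + 1) 0 0]
      show _ = aFindC s i (List.drop (i + 1) s) (i + 1) 0 0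
      rw [hrest]
    · exact ih (i + 1) d hrest
    · exact ih (i + 1) d hrest

theorem gN_le (l : List Char) : 2 * gN l ≤ l.length := by
  induction l using gN.induct with
  | case1 l hg ih =>
    have hdec := good_decomp l hg.1 hg.2.1
    have hn2 : 2 ≤ l.length := by
      have := congrArg List.length hdec
      simp at this
      omega
    have hi1 : ((l.drop 1).dropLast).length = l.length - 1 - 1 := by simp
    rw [gN, dif_pos hg]
    omega
  | case2 l hg =>
    rw [gN, dif_neg hg]
    omega

-- ===== VERDICT (by name: the statement is the Claim_ definition above) =====
theorem split_ternary_py_spec : Claim_equal_split_ternary_py := by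
  unfold Claim_equal_split_ternary_py
  intro expr _
  unfold Spec_split_ternary_py split_ternary_py split_ternary_py_alt
  dsimp only
  have h2g := gN_le expr.toList
  have hslice : PySem.List.slice expr.toList (some (bStripCount expr.toList))
      (some ((expr.toList.length : Int) - bStripCount expr.toList)) = aStrip expr.toList := by
    rw [bStripCount_eq, aStrip_eq]
    rw [PySem.List.slice_toNat expr.toList (Int.natCast_nonneg _) (by omega)]
    have ha : ((gN expr.toList : Int)).toNat = gN expr.toList := by omega
    have hb : (((expr.toList.length : Int) - (gN expr.toList : Int))).toNat =
        expr.toList.length - gN expr.toList := by omega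
    rw [ha, hb]
    congr 1
    omega
  rw [hslice]
  exact (bGo_none (aStrip expr.toList) (aStrip expr.toList) 0 0 (by simp)).symm
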